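-- pv_equiv track=rewrite | github.com/GundalaNikhil/DSA | dsa-problems/Arrays/solutions/python/ARR-010-early-discount-stay-window.py | max_profit_with_constraints
-- ===== SOURCE A (Python) =====
-- from collections import deque
--
-- def max_profit_with_constraints(prices: list[int], dMin: int, dMax: int, C: int) -> int:
--     n = len(prices)
--     dq = deque() # Stores indices
--     max_profit = 0
--
--     # Iterate through every possible SELL day j
--     for j in range(dMin, n):
--         # The buy date that just became valid is (j - dMin)
--         buy_candidate = j - dMin
--
--         # Maintain monotonic increasing deque
--         while dq and prices[dq[-1]] >= prices[buy_candidate]: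
--             dq.pop()
--         dq.append(buy_candidate)
--
--         # Remove expired indices (window looking back size dMax)
--         # Valid buy range is [j - dMax, j - dMin]
--         # So index i is valid if i >= j - dMax.
--         # Remove i if i < j - dMax.
--         if dq[0] < j - dMax:
--             dq.popleft()
--
--         # Calculate profit
--         min_buy_price = prices[dq[0]]
--         sell_price = min(prices[j], C)
--         max_profit = max(max_profit, sell_price - min_buy_price)
--
--     return max_profit
-- ===== SOURCE B (Python) =====
-- def max_profit_with_constraints(prices: list[int], dMin: int, dMax: int, C: int) -> int:
--     n = len(prices)
--     best = 0
--     for j in range(dMin, n):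
--         lo = max(0, j - dMax)
--         cheapest = min(prices[lo : j - dMin + 1])
--         best = max(best, min(prices[j], C) - cheapest)
--     return best
-- ===== Notes on version B (the rewrite author's own statement) =====
-- stated objective: simpler
-- what changed: The monotonic deque of buy-day indices is removed entirely; B recomputes each sell day's window minimum by a direct slice-min over prices[max(0,j-dMax) : j-dMin+1], keeping no state between iterations.
import Mathlib
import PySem

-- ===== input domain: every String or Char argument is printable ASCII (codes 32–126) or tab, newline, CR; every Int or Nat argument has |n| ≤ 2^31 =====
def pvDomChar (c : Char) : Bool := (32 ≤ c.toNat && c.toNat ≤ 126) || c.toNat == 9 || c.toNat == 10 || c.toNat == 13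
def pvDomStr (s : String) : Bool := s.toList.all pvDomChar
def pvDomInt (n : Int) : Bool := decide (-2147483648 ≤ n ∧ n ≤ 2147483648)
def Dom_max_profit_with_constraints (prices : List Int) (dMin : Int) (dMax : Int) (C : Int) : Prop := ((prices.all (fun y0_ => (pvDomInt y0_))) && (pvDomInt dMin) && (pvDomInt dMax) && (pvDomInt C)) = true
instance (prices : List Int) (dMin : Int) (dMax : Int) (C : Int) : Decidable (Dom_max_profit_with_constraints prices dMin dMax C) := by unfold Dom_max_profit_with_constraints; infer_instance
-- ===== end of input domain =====

-- Header: B drops A's monotonic deque and recomputes each sell day's window minimum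
-- by a direct slice scan (simpler, stateless per iteration); return values proved equal on Pre_.


-- ===== PORT A =====
-- The deque is represented back-to-front: head of the list = dq[-1] (newest), last = dq[0] (front).
-- 'while dq and prices[dq[-1]] >= prices[buy_candidate]: dq.pop()' — none = an IndexError in the condition
def aPop (prices : List Int) (bc : Int) : List Int → Option (List Int)
  | [] => some []
  | i :: rest =>
    match PySem.List.pyGet? prices i with
    | none => none
    | some p =>
      match PySem.List.pyGet? prices bc with
      | none => none
      | some pbc => if pbc ≤ p then aPop prices bc rest else some (i :: rest)

-- one iteration of A's for-loop; state = some (deque-reversed, max_profit), none = raised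
def aStep (prices : List Int) (dMin : Int) (dMax : Int) (C : Int)
    (st : Option (List Int × Int)) (j : Int) : Option (List Int × Int) :=
  match st with
  | none => none
  | some (rdq, mp) =>
    let bc := j - dMin
    match aPop prices bc rdq with
    | none => none
    | some rdq1 =>
      let rdq2 := bc :: rdq1                 -- dq.append(buy_candidate)
      match rdq2.getLast? with               -- dq[0]
      | none => none
      | some front =>
        let rdq3 := if front < j - dMax then rdq2.dropLast else rdq2   -- dq.popleft()
        match rdq3.getLast? with             -- dq[0]
        | none => none
        | some f2 =>
          match PySem.List.pyGet? prices f2 with        -- prices[dq[0]]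
          | none => none
          | some minBuy =>
            match PySem.List.pyGet? prices j with       -- prices[j]
            | none => none
            | some pj => some (rdq3, max mp (min pj C - minBuy))

def max_profit_with_constraints (prices : List Int) (dMin : Int) (dMax : Int) (C : Int) : Int :=
  let n : Int := prices.length
  match (PySem.List.pyRange dMin n 1).foldl (aStep prices dMin dMax C) (some ([], 0)) with
  | some (_, mp) => mp
  | none => 0    -- unreachable under Pre_ (A raised)

-- ===== PORT B =====
-- one iteration of B's for-loop; state = some best, none = raised (min of an empty slice)
def bStep (prices : List Int) (dMin : Int) (dMax : Int) (C : Int)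
    (st : Option Int) (j : Int) : Option Int :=
  match st with
  | none => none
  | some best =>
    let lo := max 0 (j - dMax)
    match PySem.List.min? (PySem.List.slice prices (some lo) (some (j - dMin + 1))) (fun x => x) with
    | none => none
    | some cheapest =>
      match PySem.List.pyGet? prices j with   -- prices[j]
      | none => none
      | some pj => some (max best (min pj C - cheapest))

def max_profit_with_constraints_alt (prices : List Int) (dMin : Int) (dMax : Int) (C : Int) : Int :=
  let n : Int := prices.length
  match (PySem.List.pyRange dMin n 1).foldl (bStep prices dMin dMax C) (some 0) with
  | some best => best
  | none => 0    -- unreachable under Pre_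

-- ===== PRECONDITION & SPEC =====
-- Pre_ excludes exactly the inputs on which A raises IndexError: A raises iff the loop is
-- entered (dMin < len) with a negative dMin (prices[buy_candidate] eventually out of range)
-- or with dMax < dMin (the freshly appended index is expired at once and the deque empties).
def Pre_max_profit_with_constraints (prices : List Int) (dMin : Int) (dMax : Int) (C : Int) : Prop :=
  (0 ≤ dMin ∧ dMin ≤ dMax) ∨ (prices.length : Int) ≤ dMin
instance (prices : List Int) (dMin : Int) (dMax : Int) (C : Int) : Decidable (Pre_max_profit_with_constraints prices dMin dMax C) := by unfold Pre_max_profit_with_constraints; infer_instance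

def pvWitness_max_profit_with_constraints : List Int × Int × Int × Int := ([1, 5, 2, 7], 1, 2, 6)

def Spec_max_profit_with_constraints (prices : List Int) (dMin : Int) (dMax : Int) (C : Int) (out : Int) : Prop := out = max_profit_with_constraints_alt prices dMin dMax C
instance (prices : List Int) (dMin : Int) (dMax : Int) (C : Int) (out : Int) : Decidable (Spec_max_profit_with_constraints prices dMin dMax C out) := by unfold Spec_max_profit_with_constraints; infer_instance

-- ===== CLAIM (what is proved, stated in full; the proofs are below) =====
def Claim_equal_max_profit_with_constraints : Prop := ∀ (prices : List Int) (dMin : Int) (dMax : Int) (C : Int), Dom_max_profit_with_constraints prices dMin dMax C → Pre_max_profit_with_constraints prices dMin dMax C → Spec_max_profit_with_constraints prices dMin dMax C (max_profit_with_constraints prices dMin dMax C)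

-- ===== LEMMAS AND PROOFS =====

-- prices[i] as a total function on Nat indices (used only in proofs)
def Pf (prices : List Int) (i : Nat) : Int := prices.getD i 0

-- 'i is a strict suffix-minimum up to hi': prices[i] < prices[k] for all i < k ≤ hi
def smB (prices : List Int) (hi i : Nat) : Bool :=
  decide (∀ k ∈ List.range' (i+1) (hi - i), Pf prices i < Pf prices k)

-- the reference deque: indices of window [lo, hi] that are strict suffix-minima
def Wd (prices : List Int) (lo hi : Nat) : List Nat :=
  (List.range' lo (hi + 1 - lo)).filter (smB prices hi)

-- prices[i] via pyGet? at a Nat index in range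
theorem pyGet?_Pf (prices : List Int) (i : Nat) (h : i < prices.length) :
    PySem.List.pyGet? prices ((i : Nat) : Int) = some (Pf prices i) := by
  rw [PySem.List.pyGet?_natCast]
  simp [Pf, List.getElem?_eq_getElem h, List.getD_eq_getElem?_getD, List.getElem?_eq_getElem h]

theorem mem_Wd (prices : List Int) (lo hi i : Nat) (hlo : lo ≤ hi + 1) :
    i ∈ Wd prices lo hi ↔
      lo ≤ i ∧ i ≤ hi ∧ ∀ k, i < k → k ≤ hi → Pf prices i < Pf prices k := by
  unfold Wd smB
  simp only [List.mem_filter, List.mem_range'_1, decide_eq_true_eq]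
  constructor
  · rintro ⟨⟨h1, h2⟩, h3⟩
    exact ⟨h1, by omega, fun k hk1 hk2 => h3 k ⟨by omega, by omega⟩⟩
  · rintro ⟨h1, h2, h3⟩
    exact ⟨⟨h1, by omega⟩, fun k hk => h3 k (by omega) (by omega)⟩

theorem pairwise_Wd (prices : List Int) (lo hi : Nat) :
    (Wd prices lo hi).Pairwise (· < ·) :=
  List.Pairwise.filter _ (List.pairwise_lt_range' 1)

theorem smB_succ (prices : List Int) (hi i : Nat) (h : i ≤ hi) :
    smB prices (hi+1) i = (smB prices hi i && decide (Pf prices i < Pf prices (hi+1))) := by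
  unfold smB
  have e : hi + 1 - i = (hi - i) + 1 := by omega
  rw [e, List.range'_concat]
  have e2 : i + 1 + 1 * (hi - i) = hi + 1 := by omega
  rw [e2, Bool.eq_iff_iff]
  simp only [List.mem_range'_1, List.forall_mem_append, List.forall_mem_singleton,
    Bool.and_eq_true, decide_eq_true_eq, List.mem_append, List.mem_singleton]
  constructor
  · intro hf
    exact ⟨fun k hk => hf k (Or.inl hk), hf (hi+1) (Or.inr rfl)⟩
  · rintro ⟨hf, hp⟩ k (hk | rfl)
    · exact hf k hk
    · exact hp

theorem wd_back (prices : List Int) (lo hi : Nat) (hlo : lo ≤ hi + 1) :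
    Wd prices lo (hi+1)
      = (Wd prices lo hi).filter (fun i => decide (Pf prices i < Pf prices (hi+1))) ++ [hi+1] := by
  unfold Wd
  have e : hi + 1 + 1 - lo = (hi + 1 - lo) + 1 := by omega
  rw [e, List.range'_concat]
  have e2 : lo + 1 * (hi + 1 - lo) = hi + 1 := by omega
  rw [e2, List.filter_append]
  have hsingle : List.filter (smB prices (hi+1)) [hi+1] = [hi+1] := by
    simp [smB, Nat.sub_self]
  rw [hsingle, List.filter_filter]
  congr 1
  apply List.filter_congr
  intro x hx
  rw [List.mem_range'_1] at hx
  rw [smB_succ prices hi x (by omega)]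
  rw [Bool.and_comm]

theorem wd_front (prices : List Int) (lo lo' hi : Nat) (h1 : lo ≤ lo') (h2 : lo' ≤ hi + 1) :
    Wd prices lo' hi = (Wd prices lo hi).filter (fun i => decide (lo' ≤ i)) := by
  unfold Wd
  rw [List.filter_filter]
  have e : List.range' lo (hi + 1 - lo) = List.range' lo (lo' - lo) ++ List.range' lo' (hi + 1 - lo') := by
    have := @List.range'_append lo (lo' - lo) (hi + 1 - lo') 1
    rw [show lo + 1 * (lo' - lo) = lo' by omega] at this
    rw [show (lo' - lo) + (hi + 1 - lo') = hi + 1 - lo by omega] at this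
    exact this.symm
  rw [e, List.filter_append]
  have hnil : List.filter (fun i => decide (lo' ≤ i) && smB prices hi i) (List.range' lo (lo' - lo)) = [] := by
    rw [List.filter_eq_nil_iff]
    intro a ha
    rw [List.mem_range'_1] at ha
    simp only [Bool.and_eq_true, decide_eq_true_eq]
    rintro ⟨h, -⟩; omega
  rw [hnil, List.nil_append]
  apply List.filter_congr
  intro x hx
  rw [List.mem_range'_1] at hx
  simp [show lo' ≤ x from hx.1]

theorem Wd_self (prices : List Int) (lo : Nat) : Wd prices lo lo = [lo] := by
  unfold Wd
  rw [show lo + 1 - lo = 1 by omega]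
  simp [List.range', smB, Nat.sub_self]

theorem head_min_Wd (prices : List Int) (lo hi : Nat) (h : lo ≤ hi) :
    ∃ h0 rest, Wd prices lo hi = h0 :: rest ∧ lo ≤ h0 ∧ h0 ≤ hi ∧
      ∀ k, lo ≤ k → k ≤ hi → Pf prices h0 ≤ Pf prices k := by
  induction hi, h using Nat.le_induction with
  | base =>
    exact ⟨lo, [], Wd_self prices lo, le_refl _, le_refl _, fun k h1 h2 => by
      have : k = lo := by omega
      simp [this]⟩
  | succ hi hlohi ih =>
    obtain ⟨h0, rest, heq, hl0, hh0, hmin⟩ := ih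
    rw [wd_back prices lo hi (by omega), heq]
    by_cases hp : Pf prices h0 < Pf prices (hi+1)
    · rw [show List.filter (fun i => decide (Pf prices i < Pf prices (hi+1))) (h0 :: rest)
            = h0 :: List.filter (fun i => decide (Pf prices i < Pf prices (hi+1))) rest
          from List.filter_cons_of_pos (by simpa using hp)]
      refine ⟨h0, rest.filter (fun i => decide (Pf prices i < Pf prices (hi+1))) ++ [hi+1],
        by simp, hl0, by omega, fun k h1 h2 => ?_⟩
      rcases Nat.lt_or_ge k (hi+1) with hk | hk
      · exact hmin k h1 (by omega)
      · have : k = hi + 1 := by omega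
        rw [this]; exact le_of_lt hp
    · push_neg at hp
      have hnil : List.filter (fun i => decide (Pf prices i < Pf prices (hi+1))) (h0 :: rest) = [] := by
        rw [List.filter_eq_nil_iff]
        intro a ha
        rw [← heq] at ha
        have hmem := (mem_Wd prices lo hi a (by omega)).mp ha
        have : Pf prices h0 ≤ Pf prices a := hmin a hmem.1 hmem.2.1
        simp only [decide_eq_true_eq, not_lt]; omega
      rw [hnil, List.nil_append]
      refine ⟨hi+1, [], rfl, by omega, le_refl _, fun k h1 h2 => ?_⟩
      rcases Nat.lt_or_ge k (hi+1) with hk | hk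
      · exact le_trans hp (hmin k h1 (by omega))
      · have : k = hi + 1 := by omega
        rw [this]

theorem price_pairwise_Wd (prices : List Int) (lo hi : Nat) (hlo : lo ≤ hi + 1) :
    (Wd prices lo hi).Pairwise (fun a b => Pf prices a < Pf prices b) := by
  refine (pairwise_Wd prices lo hi).imp_of_mem (fun {a b} ha hb hab => ?_)
  have hma := (mem_Wd prices lo hi a hlo).mp ha
  have hmb := (mem_Wd prices lo hi b hlo).mp hb
  exact hma.2.2 b hab hmb.2.1

theorem aPop_eq (prices : List Int) (bcn : Nat) (r : List Nat)
    (hval : ∀ i ∈ r, i < prices.length) (hbc : bcn < prices.length)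
    (hs : r.Pairwise (fun a b => Pf prices b < Pf prices a)) :
    aPop prices ((bcn : Nat) : Int) (r.map (fun i : Nat => (i : Int)))
      = some ((r.filter (fun i => decide (Pf prices i < Pf prices bcn))).map (fun i : Nat => (i : Int))) := by
  induction r with
  | nil => simp [aPop]
  | cons i r' ih =>
    have hi : i < prices.length := hval i (by simp)
    rw [List.map_cons, aPop, pyGet?_Pf prices i hi, pyGet?_Pf prices bcn hbc]
    dsimp only
    by_cases hle : Pf prices bcn ≤ Pf prices i
    · rw [if_pos hle]
      rw [show List.filter (fun x => decide (Pf prices x < Pf prices bcn)) (i :: r')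
            = List.filter (fun x => decide (Pf prices x < Pf prices bcn)) r'
          from List.filter_cons_of_neg (by simp; omega)]
      exact ih (fun x hx => hval x (by simp [hx])) hs.of_cons
    · rw [if_neg hle]
      push_neg at hle
      rw [show List.filter (fun x => decide (Pf prices x < Pf prices bcn)) (i :: r')
            = i :: List.filter (fun x => decide (Pf prices x < Pf prices bcn)) r'
          from List.filter_cons_of_pos (by simpa using hle)]
      have hself : List.filter (fun x => decide (Pf prices x < Pf prices bcn)) r' = r' := by
        rw [List.filter_eq_self]
        intro a ha
        have : Pf prices a < Pf prices i := (List.pairwise_cons.mp hs).1 a ha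
        simp only [decide_eq_true_eq]; omega
      rw [hself, List.map_cons]

theorem filter_ge_of_sorted (q : List Nat) (x lo' : Nat)
    (hq : (x :: q).Pairwise (· < ·)) (hx : lo' ≤ x + 1) :
    List.filter (fun i => decide (lo' ≤ i)) (x :: q) = if x < lo' then q else x :: q := by
  have hq' : List.filter (fun i => decide (lo' ≤ i)) q = q := by
    rw [List.filter_eq_self]
    intro a ha
    have : x < a := (List.pairwise_cons.mp hq).1 a ha
    simp only [decide_eq_true_eq]; omega
  by_cases hc : x < lo'
  · rw [if_pos hc]
    rw [show List.filter (fun i => decide (lo' ≤ i)) (x :: q)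
          = List.filter (fun i => decide (lo' ≤ i)) q
        from List.filter_cons_of_neg (by simp; omega), hq']
  · rw [if_neg hc]
    rw [show List.filter (fun i => decide (lo' ≤ i)) (x :: q)
          = x :: List.filter (fun i => decide (lo' ≤ i)) q
        from List.filter_cons_of_pos (by simp; omega), hq']

-- the deque of A, as stored (back-to-front, Int entries), for window [lo, hi]
def RD (prices : List Int) (lo hi : Nat) : List Int :=
  ((Wd prices lo hi).reverse).map (fun i : Nat => (i : Int))

-- the window minimum value: prices at the head (front) of the reference deque
def wmin (prices : List Int) (lo hi : Nat) : Int :=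
  Pf prices ((Wd prices lo hi).headD 0)

theorem wmin_min (prices : List Int) (lo hi : Nat) (h : lo ≤ hi) (hn : hi < prices.length) :
    (∃ m, lo ≤ m ∧ m ≤ hi ∧ wmin prices lo hi = Pf prices m) ∧
      ∀ k, lo ≤ k → k ≤ hi → wmin prices lo hi ≤ Pf prices k := by
  obtain ⟨h0, rest, heq, h1, h2, h3⟩ := head_min_Wd prices lo hi h
  unfold wmin
  rw [heq]
  exact ⟨⟨h0, h1, h2, rfl⟩, h3⟩

theorem stepA_first (prices : List Int) (d1 d2 : Nat) (C mp : Int)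
    (hd : d1 ≤ d2) (hn : d1 < prices.length) :
    aStep prices (d1 : Int) (d2 : Int) C (some ([], mp)) (d1 : Int)
      = some (RD prices (d1 - d2) (d1 - d1),
          max mp (min (Pf prices d1) C - wmin prices (d1 - d2) (d1 - d1))) := by
  have h0 : d1 - d2 = 0 := by omega
  have h1 : d1 - d1 = 0 := by omega
  have hlen : 0 < prices.length := by omega
  simp only [aStep, h0, h1]
  rw [show (d1 : Int) - (d1 : Int) = ((0 : Nat) : Int) by omega]
  rw [show aPop prices ((0 : Nat) : Int) [] = some [] from rfl]
  dsimp only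
  rw [show ([((0:Nat) : Int)].getLast? ) = some ((0:Nat) : Int) from rfl]
  dsimp only
  rw [if_neg (by omega : ¬ (((0:Nat) : Int) < (d1 : Int) - (d2 : Int)))]
  rw [show ([((0:Nat) : Int)].getLast? ) = some ((0:Nat) : Int) from rfl]
  dsimp only
  rw [pyGet?_Pf prices 0 hlen, pyGet?_Pf prices d1 hn]
  dsimp only
  rw [show RD prices 0 0 = [((0:Nat) : Int)] by simp [RD, Wd_self]]
  rw [show wmin prices 0 0 = Pf prices 0 by simp [wmin, Wd_self]]

theorem stepA_succ (prices : List Int) (d1 d2 : Nat) (C mp : Int) (j : Nat)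
    (hd : d1 ≤ d2) (hj : d1 ≤ j) (hn : j + 1 < prices.length) :
    aStep prices (d1 : Int) (d2 : Int) C (some (RD prices (j - d2) (j - d1), mp)) ((j : Int) + 1)
      = some (RD prices (j + 1 - d2) (j + 1 - d1),
          max mp (min (Pf prices (j + 1)) C - wmin prices (j + 1 - d2) (j + 1 - d1))) := by
  set lo := j - d2 with hlo_def
  set h := j - d1 with hh_def
  set lo' := j + 1 - d2 with hlo'_def
  have hbcn : j + 1 - d1 = h + 1 := by omega
  have hloh : lo ≤ h := by omega
  have hh1n : h + 1 < prices.length := by omega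
  have hval : ∀ i ∈ (Wd prices lo h).reverse, i < prices.length := by
    intro i hi
    rw [List.mem_reverse] at hi
    have := (mem_Wd prices lo h i (by omega)).mp hi
    omega
  have hs : ((Wd prices lo h).reverse).Pairwise (fun a b => Pf prices b < Pf prices a) :=
    List.pairwise_reverse.mpr (price_pairwise_Wd prices lo h (by omega))
  have hpop := aPop_eq prices (h + 1) ((Wd prices lo h).reverse) hval (by omega) hs
  have hW1 : Wd prices lo (h + 1)
      = (Wd prices lo h).filter (fun i => decide (Pf prices i < Pf prices (h+1))) ++ [h+1] :=
    wd_back prices lo h (by omega)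
  obtain ⟨h0, rest, heq1, hl0, hh0, hmin0⟩ := head_min_Wd prices lo (h + 1) (by omega)
  simp only [aStep, RD]
  rw [hbcn]
  rw [show ((j : Int) + 1) - (d1 : Int) = ((h + 1 : Nat) : Int) by omega]
  rw [hpop]
  dsimp only
  rw [List.filter_reverse]
  have hrdq2 : ((h + 1 : Nat) : Int) ::
        (((Wd prices lo h).filter (fun i => decide (Pf prices i < Pf prices (h+1)))).reverse).map
          (fun i : Nat => (i : Int))
      = ((Wd prices lo (h+1)).reverse).map (fun i : Nat => (i : Int)) := by
    rw [hW1, List.reverse_concat, List.map_cons]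
  rw [hrdq2]
  rw [List.getLast?_map, List.getLast?_reverse,
      show (Wd prices lo (h+1)).head? = some h0 by rw [heq1]; rfl]
  simp only [Option.map_some]
  have hWd' : Wd prices lo' (h + 1)
      = if h0 < lo' then rest else Wd prices lo (h + 1) := by
    rw [wd_front prices lo lo' (h + 1) (by omega) (by omega), heq1]
    rw [filter_ge_of_sorted rest h0 lo' (by rw [← heq1]; exact pairwise_Wd prices lo (h+1)) (by omega)]
  by_cases hc : h0 < lo'
  · rw [if_pos (by omega : ((h0 : Nat) : Int) < (j : Int) + 1 - (d2 : Int))]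
    rw [← List.map_dropLast, List.dropLast_reverse,
        show (Wd prices lo (h+1)).tail = rest by rw [heq1]; rfl]
    rw [show rest = Wd prices lo' (h + 1) by rw [hWd', if_pos hc]]
    obtain ⟨h0', rest', heq2, hl0', hh0', hmin'⟩ := head_min_Wd prices lo' (h + 1) (by omega)
    rw [List.getLast?_map, List.getLast?_reverse,
        show (Wd prices lo' (h+1)).head? = some h0' by rw [heq2]; rfl]
    simp only [Option.map_some]
    rw [pyGet?_Pf prices h0' (by omega)]
    rw [show (j : Int) + 1 = (((j+1) : Nat) : Int) by omega, pyGet?_Pf prices (j+1) hn]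
    dsimp only
    rw [show wmin prices lo' (h + 1) = Pf prices h0' by simp [wmin, heq2]]
  · rw [if_neg (by omega : ¬ (((h0 : Nat) : Int) < (j : Int) + 1 - (d2 : Int)))]
    have hWeq : Wd prices lo' (h + 1) = Wd prices lo (h + 1) := by rw [hWd', if_neg hc]
    rw [List.getLast?_map, List.getLast?_reverse,
        show (Wd prices lo (h+1)).head? = some h0 by rw [heq1]; rfl]
    simp only [Option.map_some]
    rw [pyGet?_Pf prices h0 (by omega)]
    rw [show (j : Int) + 1 = (((j+1) : Nat) : Int) by omega, pyGet?_Pf prices (j+1) hn]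
    dsimp only
    rw [show wmin prices lo' (h + 1) = Pf prices h0 by simp [wmin, hWeq, heq1]]
    rw [hWeq]

theorem stepB_eq (prices : List Int) (d1 d2 : Nat) (C mp : Int) (t : Nat)
    (hd : d1 ≤ d2) (ht : d1 ≤ t) (hn : t < prices.length) :
    bStep prices (d1 : Int) (d2 : Int) C (some mp) (t : Int)
      = some (max mp (min (Pf prices t) C - wmin prices (t - d2) (t - d1))) := by
  set lo := t - d2 with hlo_def
  set h := t - d1 with hh_def
  have hloh : lo ≤ h := by omega
  simp only [bStep]
  rw [show max 0 ((t : Int) - (d2 : Int)) = ((lo : Nat) : Int) by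
    rcases Nat.le_total d2 t with hcase | hcase
    · rw [max_eq_right (by omega : (0:Int) ≤ (t : Int) - (d2 : Int))]; omega
    · rw [max_eq_left (by omega : (t : Int) - (d2 : Int) ≤ 0)]; omega]
  rw [show (t : Int) - (d1 : Int) + 1 = ((h + 1 : Nat) : Int) by omega]
  rw [PySem.List.slice_natCast]
  set w := List.take (h + 1 - lo) (List.drop lo prices) with hw_def
  have hwlen : w.length = min (h + 1 - lo) (prices.length - lo) := by
    rw [hw_def, List.length_take, List.length_drop]
  have hwget : ∀ (r : Nat) (hr : r < w.length), w[r] = Pf prices (lo + r) := by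
    intro r hr
    rw [List.getElem_of_eq hw_def hr, List.getElem_take, List.getElem_drop]
    have hlt : lo + r < prices.length := by
      have := hr; rw [hwlen] at this; omega
    simp [Pf, List.getD_eq_getElem?_getD, List.getElem?_eq_getElem hlt]
  have hwne : w ≠ [] := by
    have : 0 < w.length := by rw [hwlen]; omega
    exact List.ne_nil_of_length_pos this
  obtain ⟨m, hm⟩ : ∃ m, PySem.List.min? w (fun x => x) = some m := by
    cases hmq : PySem.List.min? w (fun x => x) with
    | none => exact absurd ((PySem.List.min?_eq_none_iff w _).mp hmq) hwne
    | some m => exact ⟨m, rfl⟩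
  rw [hm]
  dsimp only
  rw [show (t : Int) = ((t : Nat) : Int) from rfl, pyGet?_Pf prices t hn]
  dsimp only
  -- the slice minimum equals the deque-front minimum
  obtain ⟨⟨m0, hm1, hm2, hm3⟩, hminP⟩ := wmin_min prices lo h hloh (by omega)
  have hmem_val : ∀ y ∈ w, ∃ k, lo ≤ k ∧ k ≤ h ∧ y = Pf prices k := by
    intro y hy
    obtain ⟨r, hr, hry⟩ := List.mem_iff_getElem.mp hy
    refine ⟨lo + r, by omega, ?_, by rw [← hry, hwget r hr]⟩
    have := hr; rw [hwlen] at this; omega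
  have h1 : m ≤ wmin prices lo h := by
    have hmemw : Pf prices m0 ∈ w := by
      rw [List.mem_iff_getElem]
      refine ⟨m0 - lo, ?_, ?_⟩
      · rw [hwlen]; omega
      · rw [hwget (m0 - lo) (by rw [hwlen]; omega), show lo + (m0 - lo) = m0 by omega]
    rw [hm3]
    exact PySem.List.min?_isMin hm _ hmemw
  have h2 : wmin prices lo h ≤ m := by
    obtain ⟨k, hk1, hk2, hk3⟩ := hmem_val m (PySem.List.min?_mem hm)
    rw [hk3]
    exact hminP k hk1 hk2
  rw [le_antisymm h1 h2]

-- result extraction (the final match of each port)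
def exA (o : Option (List Int × Int)) : Int := match o with | some (_, m) => m | none => 0
def exB (o : Option Int) : Int := match o with | some m => m | none => 0

theorem main_fold (prices : List Int) (C : Int) (d1 d2 : Nat) (hd : d1 ≤ d2) :
    ∀ (len j : Nat) (mp : Int), d1 ≤ j → j + 1 + len = prices.length →
      exA ((PySem.List.pyRange ((j : Int) + 1) (prices.length : Int) 1).foldl
            (aStep prices (d1 : Int) (d2 : Int) C) (some (RD prices (j - d2) (j - d1), mp)))
        = exB ((PySem.List.pyRange ((j : Int) + 1) (prices.length : Int) 1).foldl
            (bStep prices (d1 : Int) (d2 : Int) C) (some mp)) := by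
  intro len
  induction len with
  | zero =>
    intro j mp hj hlen
    rw [PySem.List.pyRange_one_eq_nil (by omega)]
    rfl
  | succ len ih =>
    intro j mp hj hlen
    rw [PySem.List.pyRange_one_cons (by omega : (j : Int) + 1 < (prices.length : Int))]
    rw [List.foldl_cons, List.foldl_cons]
    rw [show (j : Int) + 1 = (((j + 1) : Nat) : Int) by omega] 
    rw [show aStep prices (d1 : Int) (d2 : Int) C (some (RD prices (j - d2) (j - d1), mp)) (((j+1) : Nat) : Int)
          = some (RD prices (j + 1 - d2) (j + 1 - d1),
              max mp (min (Pf prices (j + 1)) C - wmin prices (j + 1 - d2) (j + 1 - d1))) by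
      rw [show (((j+1) : Nat) : Int) = (j : Int) + 1 by omega]
      exact stepA_succ prices d1 d2 C mp j hd hj (by omega)]
    rw [stepB_eq prices d1 d2 C mp (j + 1) hd (by omega) (by omega)]
    have := ih (j + 1) (max mp (min (Pf prices (j + 1)) C - wmin prices (j + 1 - d2) (j + 1 - d1)))
      (by omega) (by omega)
    rw [show (((j + 1) : Nat) : Int) + 1 = (((j + 1) : Nat) : Int) + 1 from rfl] at this
    exact this

theorem max_profit_with_constraints_spec : Claim_equal_max_profit_with_constraints := by
  intro prices dMin dMax C hdom hpre
  unfold Spec_max_profit_with_constraints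
  simp only [max_profit_with_constraints, max_profit_with_constraints_alt]
  by_cases hn : (prices.length : Int) ≤ dMin
  · rw [PySem.List.pyRange_one_eq_nil hn]
    rfl
  · have hpre' : 0 ≤ dMin ∧ dMin ≤ dMax := by
      rcases hpre with h | h
      · exact h
      · exact absurd h hn
    obtain ⟨hd0, hdd⟩ := hpre'
    have hd1 : ((dMin.toNat : Nat) : Int) = dMin := Int.toNat_of_nonneg hd0
    have hd2 : ((dMax.toNat : Nat) : Int) = dMax := Int.toNat_of_nonneg (le_trans hd0 hdd)
    set d1 := dMin.toNat with hd1_def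
    set d2 := dMax.toNat with hd2_def
    have hdle : d1 ≤ d2 := by omega
    have hlen : d1 < prices.length := by omega
    rw [← hd1, ← hd2]
    rw [PySem.List.pyRange_one_cons (by omega : ((d1 : Nat) : Int) < (prices.length : Int))]
    rw [List.foldl_cons, List.foldl_cons]
    rw [stepA_first prices d1 d2 C 0 hdle hlen]
    rw [stepB_eq prices d1 d2 C 0 d1 hdle (le_refl d1) hlen]
    have hmain := main_fold prices C d1 d2 hdle (prices.length - (d1+1)) d1
      (max 0 (min (Pf prices d1) C - wmin prices (d1 - d2) (d1 - d1))) (le_refl d1) (by omega)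
    exact hmain
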